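-- pv_equiv track=rewrite | github.com/shinbamba/shabonk | 16_listcomp/test.py | check
-- ===== SOURCE A (Python) =====
-- upper = "ABCDEFGHIJKLMNOPQRSTUVWXYZ"
--
-- lower = "abcdefghijklmnopqrstuvqxyz"
--
-- num = "1234567890"
--
-- def check(word):
--     f = [
-- 	1 if x in upper
-- 	else 2 if x in lower
-- 	else 3 if x in num
-- 	else 0 for x in word
-- 	]
--     return (1 in f and 2 in f and 3 in f)
-- ===== SOURCE B (Python) =====
-- upper = "ABCDEFGHIJKLMNOPQRSTUVWXYZ"
--
-- lower = "abcdefghijklmnopqrstuvqxyz"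
--
-- num = "1234567890"
--
-- def check(word):
--     return (any(x in upper for x in word)
--             and any(x in lower for x in word)
--             and any(x in num for x in word))
-- ===== Notes on version B (the rewrite author's own statement) =====
-- stated objective: idiomatic
-- what changed: Drops the intermediate classification-code list entirely: B is the conjunction of three independent any() scans over the same (typo'd) alphabet strings, correct because the three alphabets are disjoint.
import Mathlib
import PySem

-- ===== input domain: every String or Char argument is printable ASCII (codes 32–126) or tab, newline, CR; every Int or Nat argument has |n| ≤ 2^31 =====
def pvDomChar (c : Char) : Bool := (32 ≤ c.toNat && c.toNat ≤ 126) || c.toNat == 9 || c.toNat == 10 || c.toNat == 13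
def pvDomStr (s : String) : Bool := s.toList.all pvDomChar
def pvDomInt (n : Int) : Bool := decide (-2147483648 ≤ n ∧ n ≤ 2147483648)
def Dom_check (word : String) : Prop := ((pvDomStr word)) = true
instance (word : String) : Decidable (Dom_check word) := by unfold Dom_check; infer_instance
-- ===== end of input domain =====

-- B replaces A's classification-code list by three independent any() membership scans
-- over the same module-level alphabet strings (idiomatic; same cost).

-- module-level constants, shared by both programs (A's and B's Python both use them)
def pvUpper : List Char := "ABCDEFGHIJKLMNOPQRSTUVWXYZ".toList
def pvLower : List Char := "abcdefghijklmnopqrstuvqxyz".toList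
def pvNum : List Char := "1234567890".toList

-- ===== PORT A =====
-- the conditional expression classifying one character (1/2/3/0)
def pvCode (x : Char) : Int :=
  if pvUpper.contains x then 1
  else if pvLower.contains x then 2
  else if pvNum.contains x then 3
  else 0

def check (word : String) : Bool :=
  let f : List Int := word.toList.map pvCode
  f.contains 1 && f.contains 2 && f.contains 3

-- ===== PORT B =====
def check_alt (word : String) : Bool :=
  word.toList.any (fun x => pvUpper.contains x)
  && word.toList.any (fun x => pvLower.contains x)
  && word.toList.any (fun x => pvNum.contains x)

-- ===== PRECONDITION & SPEC =====
def Spec_check (word : String) (out : Bool) : Prop := out = check_alt word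
instance (word : String) (out : Bool) : Decidable (Spec_check word out) := by unfold Spec_check; infer_instance

-- ===== CLAIM (what is proved, stated in full; the proofs are below) =====
def Claim_equal_check : Prop := ∀ (word : String), Dom_check word → Spec_check word (check word)

-- ===== LEMMAS AND PROOFS =====

-- the three alphabets are pairwise disjoint
theorem pvDisjUL (c : Char) (h : c ∈ pvLower) : c ∉ pvUpper := by
  have hall : pvLower.all (fun c => !pvUpper.contains c) = true := by decide
  have := List.all_eq_true.mp hall c h
  simpa using this

theorem pvDisjUN (c : Char) (h : c ∈ pvNum) : c ∉ pvUpper := by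
  have hall : pvNum.all (fun c => !pvUpper.contains c) = true := by decide
  have := List.all_eq_true.mp hall c h
  simpa using this

theorem pvDisjLN (c : Char) (h : c ∈ pvNum) : c ∉ pvLower := by
  have hall : pvNum.all (fun c => !pvLower.contains c) = true := by decide
  have := List.all_eq_true.mp hall c h
  simpa using this

theorem pvCode_eq_one (c : Char) : (pvCode c == 1) = decide (c ∈ pvUpper) := by
  by_cases hU : c ∈ pvUpper <;> by_cases hL : c ∈ pvLower <;> by_cases hN : c ∈ pvNum <;>
    simp [pvCode, hU, hL, hN]

theorem pvCode_eq_two (c : Char) : (pvCode c == 2) = decide (c ∈ pvLower) := by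
  by_cases hL : c ∈ pvLower
  · have hU := pvDisjUL c hL
    simp [pvCode, hU, hL]
  · by_cases hU : c ∈ pvUpper <;> by_cases hN : c ∈ pvNum <;> simp [pvCode, hU, hL, hN]

theorem pvCode_eq_three (c : Char) : (pvCode c == 3) = decide (c ∈ pvNum) := by
  by_cases hN : c ∈ pvNum
  · have hU := pvDisjUN c hN
    have hL := pvDisjLN c hN
    simp [pvCode, hU, hL, hN]
  · by_cases hU : c ∈ pvUpper <;> by_cases hL : c ∈ pvLower <;> simp [pvCode, hU, hL, hN]

theorem pvContains_map_code (l : List Char) (k : Int) :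
    (l.map pvCode).contains k = l.any (fun c => pvCode c == k) := by
  induction l with
  | nil => rfl
  | cons c t ih =>
      simp only [List.map_cons, List.contains_cons, List.any_cons, ih]
      cases h : pvCode c == k
      · simp [BEq.comm] at h ⊢
        simp [h]
      · simp [BEq.comm] at h ⊢
        simp [h]

-- ===== VERDICT (by name: the statement is the Claim_ definition above) =====
theorem check_spec : Claim_equal_check := by
  intro word _
  unfold Spec_check check check_alt
  simp only [pvContains_map_code, pvCode_eq_one, pvCode_eq_two, pvCode_eq_three]
  simp [List.any_eq, List.contains_eq_mem]
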